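-- pv_equiv track=rewrite | github.com/MrBrantCode/unitest_baseline | mut_generate/mist_train_taco/taco_442/solution.py | count_unique_substrings_in_pile
-- ===== SOURCE A (Python) =====
-- def count_unique_substrings_in_pile(pile, B):
--     # Generate all possible substrings of B
--     substrings = [B[i:j] for i in range(len(B)) for j in range(i + 1, len(B) + 1)]
--
--     # Remove duplicates by converting to a set and back to a list
--     unique_substrings = list(dict.fromkeys(substrings))
--
--     # Count how many unique substrings are present in the pile
--     count = 0
--     for substring in unique_substrings:
--         if substring in pile:
--             count += 1
--
--     return count
-- ===== SOURCE B (Python) =====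
-- def count_unique_substrings_in_pile(pile, B):
--     # Per length L: hash-set intersection of the length-L substrings of B and of pile.
--     total = 0
--     m = len(B)
--     n = len(pile)
--     for L in range(1, m + 1):
--         b_subs = {B[i:i + L] for i in range(m - L + 1)}
--         p_subs = {pile[k:k + L] for k in range(n - L + 1)}
--         total += len(b_subs & p_subs)
--     return total
-- ===== Notes on version B (the rewrite author's own statement) =====
-- stated objective: faster
-- what changed: Instead of generating every substring of B, deduplicating, and scanning pile for each one, B iterates over lengths L and intersects the hash-set of length-L substrings of B with the hash-set of length-L substrings of pile, summing the intersection sizes.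
import Mathlib
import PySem

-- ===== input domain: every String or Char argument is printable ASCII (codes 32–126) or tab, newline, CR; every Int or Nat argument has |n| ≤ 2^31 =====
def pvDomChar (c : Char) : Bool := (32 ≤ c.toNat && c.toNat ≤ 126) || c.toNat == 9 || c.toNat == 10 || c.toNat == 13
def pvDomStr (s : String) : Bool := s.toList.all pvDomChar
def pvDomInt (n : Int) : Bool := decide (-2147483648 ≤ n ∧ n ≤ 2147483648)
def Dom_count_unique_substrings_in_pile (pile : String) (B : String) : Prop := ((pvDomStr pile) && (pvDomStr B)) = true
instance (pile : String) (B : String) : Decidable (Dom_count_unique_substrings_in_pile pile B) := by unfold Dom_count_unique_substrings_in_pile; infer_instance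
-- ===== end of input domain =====

-- B replaces A's "generate and dedup all substrings of B, then scan pile for each" by a
-- per-length hash-set intersection of the sliding windows of B and of pile (objective: faster).

-- ===== PORT A =====
def count_unique_substrings_in_pile (pile : String) (B : String) : Int :=
  let substrings :=
    (PySem.List.pyRange 0 (PySem.Str.len B)).flatMap (fun i =>
      (PySem.List.pyRange (i + 1) (PySem.Str.len B + 1)).map (fun j =>
        PySem.Str.slice B (some i) (some j)))
  let unique_substrings := PySem.List.dedup substrings
  unique_substrings.foldl (fun count substring =>
    if PySem.Str.isIn substring pile then count + 1 else count) 0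

-- ===== PORT B =====
def count_unique_substrings_in_pile_alt (pile : String) (B : String) : Int :=
  let m := PySem.Str.len B
  let n := PySem.Str.len pile
  (PySem.List.pyRange 1 (m + 1)).foldl (fun total L =>
    let b_subs : PySem.Set String :=
      PySem.Set.ofList ((PySem.List.pyRange 0 (m - L + 1)).map (fun i =>
        PySem.Str.slice B (some i) (some (i + L))))
    let p_subs : PySem.Set String :=
      PySem.Set.ofList ((PySem.List.pyRange 0 (n - L + 1)).map (fun k =>
        PySem.Str.slice pile (some k) (some (k + L))))
    total + PySem.Set.len (PySem.Set.inter b_subs p_subs)) 0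

-- ===== PRECONDITION & SPEC =====
def Spec_count_unique_substrings_in_pile (pile : String) (B : String) (out : Int) : Prop := out = count_unique_substrings_in_pile_alt pile B
instance (pile : String) (B : String) (out : Int) : Decidable (Spec_count_unique_substrings_in_pile pile B out) := by unfold Spec_count_unique_substrings_in_pile; infer_instance

-- ===== CLAIM (what is proved, stated in full; the proofs are below) =====
def Claim_equal_count_unique_substrings_in_pile : Prop := ∀ (pile : String) (B : String), Dom_count_unique_substrings_in_pile pile B → Spec_count_unique_substrings_in_pile pile B (count_unique_substrings_in_pile pile B)

-- ===== LEMMAS AND PROOFS =====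

-- A's substring comprehension, A's inner loop body counted, B's per-length window lists:
-- names for the subterms of the two ports that the lemmas below talk about.
def pvSubs (B : String) : List String :=
  (PySem.List.pyRange 0 (PySem.Str.len B)).flatMap (fun i =>
    (PySem.List.pyRange (i + 1) (PySem.Str.len B + 1)).map (fun j =>
      PySem.Str.slice B (some i) (some j)))

def pvWin (x : String) (L : Int) : List String :=
  (PySem.List.pyRange 0 (PySem.Str.len x - L + 1)).map (fun k =>
    PySem.Str.slice x (some k) (some (k + L)))

def pvg (pile B : String) (L : Int) : Int :=
  PySem.Set.len (PySem.Set.inter (PySem.Set.ofList (pvWin B L)) (PySem.Set.ofList (pvWin pile L)))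

-- the set of distinct nonempty substrings of B occurring in pile, as a Finset
def pvG (pile B : String) : Finset String :=
  ((PySem.List.dedup (pvSubs B)).filter (fun s => PySem.Str.isIn s pile)).toFinset

theorem pv_foldl_count (p : String → Bool) :
    ∀ (l : List String) (c : Int),
      l.foldl (fun count s => if p s then count + 1 else count) c
        = c + ((l.filter p).length : Int) := by
  intro l
  induction l with
  | nil => intro c; simp
  | cons x t ih =>
    intro c
    by_cases hx : p x = true
    · simp [List.filter, hx, ih]; ring
    · simp [List.filter, hx, ih]

theorem pv_foldl_sum (g : Int → Int) :
    ∀ (l : List Int) (c : Int),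
      l.foldl (fun total L => total + g L) c = c + (l.map g).sum := by
  intro l
  induction l with
  | nil => intro c; simp
  | cons x t ih => intro c; simp [ih]; ring

theorem pv_list_sum_range (f : ℕ → Int) :
    ∀ (n : ℕ), ((List.range n).map f).sum = ∑ i ∈ Finset.range n, f i := by
  intro n
  induction n with
  | zero => simp
  | succ n ih => simp [List.range_succ, Finset.sum_range_succ, ih]

theorem pv_sum_Icc_one (f : ℕ → Int) :
    ∀ (n : ℕ), ∑ i ∈ Finset.Icc 1 n, f i = ∑ i ∈ Finset.range n, f (1 + i) := by
  intro n
  induction n with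
  | zero => simp
  | succ n ih =>
    rw [Finset.sum_Icc_succ_top (by omega), ih, Finset.sum_range_succ, Nat.add_comm 1 n]

-- the toList of a slice x[a:a+L] with 0 ≤ a, 0 ≤ L
theorem pv_slice_toList (x : String) (a L : Int) (ha : 0 ≤ a) (hL : 0 ≤ L) :
    (PySem.Str.slice x (some a) (some (a + L))).toList
      = (x.toList.drop a.toNat).take L.toNat := by
  rw [PySem.Str.toList_slice, PySem.Chars.slice_eq_listSlice,
      PySem.List.slice_toNat x.toList ha (by omega)]
  congr 1
  omega

-- membership in A's substring comprehension = nonempty infix of B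
theorem pv_mem_subsA (B s : String) :
    s ∈ pvSubs B ↔ (s.toList ≠ [] ∧ s.toList <:+: B.toList) := by
  unfold pvSubs
  rw [List.mem_flatMap]
  constructor
  · rintro ⟨i, hi, hs⟩
    rw [List.mem_map] at hs
    obtain ⟨j, hj, rfl⟩ := hs
    rw [PySem.List.mem_pyRange_one, PySem.Str.len_eq] at hi hj
    have h0i : 0 ≤ i := hi.1
    have h0j : 0 ≤ j := by omega
    rw [PySem.Str.toList_slice, PySem.Chars.slice_eq_listSlice,
        PySem.List.slice_toNat B.toList h0i h0j]
    refine ⟨?_, ((B.toList.drop i.toNat).take_prefix _).isInfix.trans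
      (B.toList.drop_suffix i.toNat).isInfix⟩
    apply List.length_pos_iff.mp
    rw [List.length_take, List.length_drop]
    omega
  · rintro ⟨hne, u, v, huv⟩
    have hlen : u.length + s.toList.length + v.length = B.toList.length := by
      rw [← huv]; simp; omega
    have hpos : 0 < s.toList.length := List.length_pos_iff.mpr hne
    refine ⟨(u.length : Int), ?_, ?_⟩
    · rw [PySem.List.mem_pyRange_one, PySem.Str.len_eq]
      constructor <;> [positivity; omega]
    · rw [List.mem_map]
      refine ⟨(u.length : Int) + (s.toList.length : Int), ?_, ?_⟩
      · rw [PySem.List.mem_pyRange_one, PySem.Str.len_eq]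
        constructor <;> omega
      · apply String.toList_inj.mp
        rw [pv_slice_toList B _ _ (by positivity) (by positivity)]
        rw [← huv]
        have h1 : (u.length : Int).toNat = u.length := by omega
        have h2 : (s.toList.length : Int).toNat = s.toList.length := by omega
        rw [h1, h2, List.append_assoc, List.drop_left, List.take_left]

-- membership in a length-L sliding-window comprehension = infix of length L
theorem pv_mem_win (x s : String) (L : Int) (hL : 1 ≤ L) :
    s ∈ pvWin x L ↔ (s.toList <:+: x.toList ∧ (s.toList.length : Int) = L) := by
  unfold pvWin
  rw [List.mem_map]
  constructor
  · rintro ⟨k, hk, rfl⟩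
    rw [PySem.List.mem_pyRange_one, PySem.Str.len_eq] at hk
    obtain ⟨hk0, hk1⟩ := hk
    rw [pv_slice_toList x k L hk0 (by omega)]
    refine ⟨((x.toList.drop k.toNat).take_prefix L.toNat).isInfix.trans
      (x.toList.drop_suffix k.toNat).isInfix, ?_⟩
    rw [List.length_take, List.length_drop]
    have : L.toNat + k.toNat ≤ x.toList.length := by omega
    push_cast
    omega
  · rintro ⟨⟨u, v, huv⟩, hlen⟩
    refine ⟨(u.length : Int), ?_, ?_⟩
    · rw [PySem.List.mem_pyRange_one, PySem.Str.len_eq]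
      have : u.length + s.toList.length + v.length = x.toList.length := by
        rw [← huv]; simp; omega
      constructor <;> [positivity; omega]
    · apply String.toList_inj.mp
      rw [pv_slice_toList x _ L (by positivity) (by omega)]
      rw [← huv]
      have h1 : (u.length : Int).toNat = u.length := by omega
      have h2 : L.toNat = s.toList.length := by omega
      rw [h1, h2, List.append_assoc, List.drop_left, List.take_left]

-- the intersection counted by B at length L is exactly the length-L fiber of pvG
theorem pv_win_toFinset (pile B : String) (L : ℕ) (hL : 1 ≤ L) :
    (PySem.Set.inter (PySem.Set.ofList (pvWin B (L : Int)))
        (PySem.Set.ofList (pvWin pile (L : Int)))).toFinset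
      = (pvG pile B).filter (fun s => s.toList.length = L) := by
  have hL' : (1 : Int) ≤ (L : Int) := by exact_mod_cast hL
  ext s
  rw [List.mem_toFinset, Finset.mem_filter, PySem.Set.mem_inter,
      PySem.Set.mem_ofList, PySem.Set.mem_ofList,
      pv_mem_win B s _ hL', pv_mem_win pile s _ hL']
  unfold pvG
  rw [List.mem_toFinset, List.mem_filter, PySem.List.mem_dedup, pv_mem_subsA,
      PySem.Str.isIn_iff_infix]
  constructor
  · rintro ⟨⟨hinfB, hlen⟩, hinfP, -⟩
    have hlen' : s.toList.length = L := by exact_mod_cast hlen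
    exact ⟨⟨⟨by intro h; rw [h] at hlen'; simp at hlen'; omega, hinfB⟩, hinfP⟩, hlen'⟩
  · rintro ⟨⟨⟨-, hinfB⟩, hinfP⟩, hlen⟩
    exact ⟨⟨hinfB, by exact_mod_cast hlen⟩, hinfP, by exact_mod_cast hlen⟩

-- ===== VERDICT (by name: the statement is the Claim_ definition above) =====
theorem count_unique_substrings_in_pile_spec : Claim_equal_count_unique_substrings_in_pile := by
  intro pile B _
  unfold Spec_count_unique_substrings_in_pile
  -- A's loop counts the filtered dedup list
  have hA : count_unique_substrings_in_pile pile B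
      = 0 + (((PySem.List.dedup (pvSubs B)).filter (fun s => PySem.Str.isIn s pile)).length : Int) :=
    pv_foldl_count _ _ 0
  have hcard : ((PySem.List.dedup (pvSubs B)).filter (fun s => PySem.Str.isIn s pile)).length
      = (pvG pile B).card :=
    (List.toFinset_card_of_nodup (List.Nodup.filter _ (PySem.List.nodup_dedup _))).symm
  -- B's loop sums pvg over range(1, m+1)
  have hB : count_unique_substrings_in_pile_alt pile B
      = 0 + ((PySem.List.pyRange 1 (PySem.Str.len B + 1)).map (pvg pile B)).sum :=
    pv_foldl_sum _ _ 0
  have hm : (PySem.Str.len B + 1 - 1).toNat = B.toList.length := by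
    rw [PySem.Str.len_eq]; omega
  rw [PySem.List.pyRange_one, hm, List.map_map, pv_list_sum_range] at hB
  have hshift : ∑ i ∈ Finset.range B.toList.length, (pvg pile B ∘ fun k : ℕ => 1 + (k : Int)) i
      = ∑ L ∈ Finset.Icc 1 B.toList.length, pvg pile B (L : Int) := by
    rw [pv_sum_Icc_one (fun L : ℕ => pvg pile B (L : Int)) B.toList.length]
    refine Finset.sum_congr rfl (fun i _ => ?_)
    simp only [Function.comp]
    push_cast
    ring_nf
  rw [hshift] at hB
  -- each term of B's sum is a fiber cardinality
  have hperL : ∀ L ∈ Finset.Icc 1 B.toList.length,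
      pvg pile B (L : Int)
        = (((pvG pile B).filter (fun s => s.toList.length = L)).card : Int) := by
    intro L hLmem
    rw [Finset.mem_Icc] at hLmem
    have hnd : (PySem.Set.inter (PySem.Set.ofList (pvWin B (L : Int)))
        (PySem.Set.ofList (pvWin pile (L : Int)))).Nodup :=
      PySem.Set.nodup_inter _ _ (PySem.Set.nodup_ofList _)
    have hlen : pvg pile B (L : Int)
        = ((PySem.Set.inter (PySem.Set.ofList (pvWin B (L : Int)))
            (PySem.Set.ofList (pvWin pile (L : Int)))).length : Int) := rfl
    rw [hlen, ← List.toFinset_card_of_nodup hnd, pv_win_toFinset pile B L hLmem.1]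
  -- lengths fiber pvG over Icc 1 |B|
  have hmaps : ∀ s ∈ pvG pile B, s.toList.length ∈ Finset.Icc 1 B.toList.length := by
    intro s hs
    unfold pvG at hs
    rw [List.mem_toFinset, List.mem_filter, PySem.List.mem_dedup, pv_mem_subsA] at hs
    obtain ⟨⟨hne, hinf⟩, -⟩ := hs
    rw [Finset.mem_Icc]
    exact ⟨List.length_pos_iff.mpr hne, hinf.length_le⟩
  have hfib : (pvG pile B).card
      = ∑ L ∈ Finset.Icc 1 B.toList.length,
          ((pvG pile B).filter (fun s => s.toList.length = L)).card :=
    Finset.card_eq_sum_card_fiberwise hmaps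
  rw [hA, hB, zero_add, zero_add, hcard, hfib, Finset.sum_congr rfl hperL]
  push_cast
  rfl
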